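-- pv_equiv track=rewrite | github.com/ryeongse25/algorithm | 프로그래머스/unrated/181881. 조건에 맞게 수열 변환하기 2/조건에 맞게 수열 변환하기 2.py | solution
-- ===== SOURCE A (Python) =====
-- def solution(arr):
--     iterates = [arr]
--
--     while(1):
--         tmp = []
--         for i in range(len(arr)):
--             if iterates[-1][i] >= 50 and iterates[-1][i] % 2 == 0:
--                 tmp.append(iterates[-1][i] // 2)
--             elif iterates[-1][i] < 50 and iterates[-1][i] % 2:
--                 tmp.append(iterates[-1][i] * 2 + 1)
--             else:
--                 tmp.append(iterates[-1][i])
--         iterates.append(tmp)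
--
--         if iterates[-1] == iterates[-2]:
--             return len(iterates) - 2
-- ===== SOURCE B (Python) =====
-- def solution(arr):
--     best = 0
--     for x in arr:
--         c = 0
--         while True:
--             if x >= 50 and x % 2 == 0:
--                 y = x // 2
--             elif x < 50 and x % 2:
--                 y = x * 2 + 1
--             else:
--                 y = x
--             if y == x:
--                 break
--             x = y
--             c += 1
--         best = max(best, c)
--     return best
-- ===== Notes on version B (the rewrite author's own statement) =====
-- stated objective: alternative
-- what changed: Replaces A's repeated whole-array rescan-and-compare loop (building a full history of arrays) with a single element-major pass that simulates each element's own transform chain and returns the maximum per-element step count.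
import Mathlib
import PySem

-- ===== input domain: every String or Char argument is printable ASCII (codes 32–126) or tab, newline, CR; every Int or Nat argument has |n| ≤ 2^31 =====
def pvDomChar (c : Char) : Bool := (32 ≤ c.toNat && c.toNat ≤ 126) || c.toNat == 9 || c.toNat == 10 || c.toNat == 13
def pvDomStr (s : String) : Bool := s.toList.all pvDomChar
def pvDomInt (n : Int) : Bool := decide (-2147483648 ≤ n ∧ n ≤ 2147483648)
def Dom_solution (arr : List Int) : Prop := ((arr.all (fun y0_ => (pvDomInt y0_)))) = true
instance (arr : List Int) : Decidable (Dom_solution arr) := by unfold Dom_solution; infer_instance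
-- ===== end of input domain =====

-- B replaces A's repeated whole-array rescan-and-compare loop with a single element-major
-- pass that simulates each element's own transform chain and takes the maximum step count
-- (alternative decomposition; arr is not mutated by either program).

-- ===== PORT A =====
-- the inner 'for i in range(len(arr))' building tmp from iterates[-1]
def solutionTmp (prev : List Int) (n : Nat) : List Int :=
  (PySem.List.pyRange 0 (n : Int) 1).foldl (fun tmp i =>
    let v := PySem.List.pyGetD prev i 0
    if 50 ≤ v ∧ PySem.Int.mod v 2 = 0 then tmp ++ [PySem.Int.floordiv v 2]
    else if v < 50 ∧ PySem.Int.mod v 2 ≠ 0 then tmp ++ [v * 2 + 1]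
    else tmp ++ [v]) []

-- the 'while(1)' loop; fuel is only a totalization guard (A's Python has no bound)
def solutionLoop (arr : List Int) (iterates : List (List Int)) : Nat → Int
  | 0 => 0
  | fuel + 1 =>
    let prev := PySem.List.pyGetD iterates (-1) []
    let tmp := solutionTmp prev arr.length
    let its := iterates ++ [tmp]
    if PySem.List.pyGetD its (-1) [] = PySem.List.pyGetD its (-2) [] then
      (its.length : Int) - 2
    else solutionLoop arr its fuel

def solution (arr : List Int) : Int :=
  solutionLoop arr [arr] ((arr.map (fun x => x.natAbs)).sum + 101)

-- ===== PORT B =====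
-- one elementwise transform step (the helper 'transform'-style branch of Source B)
def pvTransform (x : Int) : Int :=
  if 50 ≤ x ∧ PySem.Int.mod x 2 = 0 then PySem.Int.floordiv x 2
  else if x < 50 ∧ PySem.Int.mod x 2 ≠ 0 then x * 2 + 1
  else x

-- the per-element 'while True' with counter c; fuel is only a totalization guard
def pvStepsAux (x : Int) (c : Int) : Nat → Int
  | 0 => c
  | fuel + 1 =>
    let y := pvTransform x
    if y = x then c else pvStepsAux y (c + 1) fuel

def solution_alt (arr : List Int) : Int :=
  arr.foldl (fun best x => max best (pvStepsAux x 0 (x.natAbs + 101))) 0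

-- ===== PRECONDITION & SPEC =====
-- A's while-loop never returns (loops forever) when some element is odd and < -1
-- (such an element keeps changing: x -> 2*x+1 -> ... forever); Pre_ excludes exactly those inputs.
def Pre_solution (arr : List Int) : Prop := ∀ x ∈ arr, x % 2 = 0 ∨ -1 ≤ x
instance (arr : List Int) : Decidable (Pre_solution arr) := by unfold Pre_solution; infer_instance
def pvWitness_solution : List Int := [7, 52, -1, 0]

def Spec_solution (arr : List Int) (out : Int) : Prop := out = solution_alt arr
instance (arr : List Int) (out : Int) : Decidable (Spec_solution arr out) := by unfold Spec_solution; infer_instance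

-- ===== CLAIM (what is proved, stated in full; the proofs are below) =====
def Claim_equal_solution : Prop := ∀ (arr : List Int), Dom_solution arr → Pre_solution arr → Spec_solution arr (solution arr)

-- ===== LEMMAS AND PROOFS =====

-- the transform in plain Int arithmetic (emod/ediv agree with Python's on divisor 2 > 0)
def pvF (x : Int) : Int :=
  if 50 ≤ x ∧ x % 2 = 0 then x / 2 else if x < 50 ∧ x % 2 ≠ 0 then x * 2 + 1 else x

lemma pvTransform_eq (x : Int) : pvTransform x = pvF x := by
  simp [pvTransform, pvF]

def pvGood (x : Int) : Prop := x % 2 = 0 ∨ -1 ≤ x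

def pvMu (x : Int) : Nat :=
  if 50 ≤ x then (if x % 2 = 0 then x.toNat + 100 else 0) else (50 - x).toNat

lemma pvGood_step {x : Int} (h : pvGood x) : pvGood (pvF x) := by
  unfold pvGood pvF at *; split_ifs <;> omega

lemma pvMu_decr {x : Int} (hg : pvGood x) (hne : pvF x ≠ x) : pvMu (pvF x) < pvMu x := by
  unfold pvGood pvF pvMu at *; split_ifs at * <;> omega

lemma pvMu_le (x : Int) : pvMu x ≤ x.natAbs + 100 := by
  unfold pvMu; split_ifs <;> omega

-- canonical per-element step count
def pvCntF : Int → Nat → Nat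
  | _, 0 => 0
  | x, fuel + 1 => if pvF x = x then 0 else pvCntF (pvF x) fuel + 1

def pvCnt (x : Int) : Nat := pvCntF x (pvMu x + 1)

lemma pvCntF_stable : ∀ f1 f2 x, pvGood x → pvMu x < f1 → pvMu x < f2 → pvCntF x f1 = pvCntF x f2 := by
  intro f1
  induction f1 with
  | zero => intro f2 x _ h1 _; omega
  | succ n ih =>
    intro f2 x hg h1 h2
    match f2, h2 with
    | m + 1, h2 =>
      simp only [pvCntF]
      by_cases hfx : pvF x = x
      · simp [hfx]
      · have hd := pvMu_decr hg hfx
        simp only [hfx]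
        rw [ih m (pvF x) (pvGood_step hg) (by omega) (by omega)]

lemma pvCnt_fix {x : Int} (h : pvF x = x) : pvCnt x = 0 := by
  simp [pvCnt, pvCntF, h]

lemma pvCnt_succ {x : Int} (hg : pvGood x) (hne : pvF x ≠ x) : pvCnt x = pvCnt (pvF x) + 1 := by
  have hd := pvMu_decr hg hne
  have h1 : pvCnt x = pvCntF (pvF x) (pvMu x) + 1 := by
    unfold pvCnt
    simp [pvCntF, hne]
  rw [h1, pvCntF_stable (pvMu x) (pvMu (pvF x) + 1) (pvF x) (pvGood_step hg) (by omega) (by omega)]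
  rfl

lemma pvCnt_le_mu : ∀ n x, pvMu x ≤ n → pvGood x → pvCnt x ≤ pvMu x := by
  intro n
  induction n with
  | zero =>
    intro x hn hg
    by_cases h : pvF x = x
    · simp [pvCnt_fix h]
    · have := pvMu_decr hg h; omega
  | succ n ih =>
    intro x hn hg
    by_cases h : pvF x = x
    · simp [pvCnt_fix h]
    · have hd := pvMu_decr hg h
      have := ih (pvF x) (by omega) (pvGood_step hg)
      rw [pvCnt_succ hg h]; omega

lemma pvF_iterate_fix {y : Int} (h : pvF y = y) : ∀ k, pvF^[k] y = y := by
  intro k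
  induction k with
  | zero => rfl
  | succ k ih => rw [Function.iterate_succ_apply, h, ih]

lemma pvCnt_iterate_fix : ∀ n x, pvMu x ≤ n → pvGood x → pvF (pvF^[pvCnt x] x) = pvF^[pvCnt x] x := by
  intro n
  induction n with
  | zero =>
    intro x hn hg
    by_cases h : pvF x = x
    · simp [pvCnt_fix h, h]
    · have := pvMu_decr hg h; omega
  | succ n ih =>
    intro x hn hg
    by_cases h : pvF x = x
    · simp [pvCnt_fix h, h]
    · have hd := pvMu_decr hg h
      rw [pvCnt_succ hg h, Function.iterate_succ_apply]
      exact ih (pvF x) (by omega) (pvGood_step hg)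

lemma pvCnt_le_iff {x : Int} (hg : pvGood x) (j : Nat) :
    pvCnt x ≤ j ↔ pvF^[j + 1] x = pvF^[j] x := by
  constructor
  · intro hle
    have hfix := pvCnt_iterate_fix (pvMu x) x le_rfl hg
    obtain ⟨d, rfl⟩ : ∃ d, j = d + pvCnt x := ⟨j - pvCnt x, by omega⟩
    have hy : ∀ k, pvF^[k + pvCnt x] x = pvF^[pvCnt x] x := fun k => by
      rw [Function.iterate_add_apply, pvF_iterate_fix hfix k]
    rw [show d + pvCnt x + 1 = (d + 1) + pvCnt x by omega, hy (d + 1), hy d]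
  · intro heq
    induction j generalizing x with
    | zero =>
      simp only [Function.iterate_zero, id] at heq
      simp [pvCnt_fix heq]
    | succ j ih =>
      by_cases h : pvF x = x
      · simp [pvCnt_fix h]
      · rw [pvCnt_succ hg h]
        have heq' : pvF^[j + 1] (pvF x) = pvF^[j] (pvF x) := by
          rw [← Function.iterate_succ_apply, ← Function.iterate_succ_apply]
          exact heq
        have := ih (pvGood_step hg) heq'
        omega

-- the maximum per-element count
def pvM (arr : List Int) : Nat := arr.foldl (fun m x => max m (pvCnt x)) 0

lemma pv_foldl_max_le_iff : ∀ (l : List Int) (a j : Nat),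
    l.foldl (fun m x => max m (pvCnt x)) a ≤ j ↔ a ≤ j ∧ ∀ x ∈ l, pvCnt x ≤ j := by
  intro l
  induction l with
  | nil => simp
  | cons y t ih =>
    intro a j
    simp only [List.foldl_cons, ih, max_le_iff, List.mem_cons]
    constructor
    · rintro ⟨⟨h1, h2⟩, h3⟩
      refine ⟨h1, fun x hx => ?_⟩
      rcases hx with rfl | hx
      · exact h2
      · exact h3 x hx
    · rintro ⟨h1, h2⟩
      exact ⟨⟨h1, h2 y (Or.inl rfl)⟩, fun x hx => h2 x (Or.inr hx)⟩

-- the tmp-building pass is a map of the transform over the previous array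
lemma solutionTmp_eq (prev : List Int) : solutionTmp prev prev.length = prev.map pvF := by
  unfold solutionTmp
  have hfun : (fun (tmp : List Int) (i : Int) =>
      let v := PySem.List.pyGetD prev i 0
      if 50 ≤ v ∧ PySem.Int.mod v 2 = 0 then tmp ++ [PySem.Int.floordiv v 2]
      else if v < 50 ∧ PySem.Int.mod v 2 ≠ 0 then tmp ++ [v * 2 + 1]
      else tmp ++ [v]) =
      (fun (tmp : List Int) (i : Int) => tmp ++ [pvF (PySem.List.pyGetD prev i 0)]) := by
    funext tmp i
    rw [← pvTransform_eq]
    simp only [pvTransform]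
    split_ifs <;> rfl
  rw [hfun,
    PySem.List.foldl_pyRange_zero_pyGetD' prev 0 (fun acc v => acc ++ [pvF v]) [],
    PySem.List.foldl_append_singleton_eq_map]
  simp

lemma pv_map_iterate_succ (arr : List Int) (j : Nat) :
    (arr.map (pvF^[j])).map pvF = arr.map (pvF^[j + 1]) := by
  rw [List.map_map]
  apply List.map_congr_left
  intro x _
  simp [Function.iterate_succ_apply']

-- A's loop returns the maximum per-element count
lemma solutionLoop_eq : ∀ (fuel j : Nat) (iterates : List (List Int)) (arr : List Int),
    (∀ x ∈ arr, pvGood x) →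
    iterates.length = j + 1 →
    iterates.getLast? = some (arr.map (pvF^[j])) →
    j ≤ pvM arr → pvM arr - j < fuel →
    solutionLoop arr iterates fuel = (pvM arr : Int) := by
  intro fuel
  induction fuel with
  | zero => intro j iterates arr _ _ _ _ h; omega
  | succ n ih =>
    intro j iterates arr hg hlen hlast hjle hfuel
    have hne : iterates ≠ [] := by intro h; simp [h] at hlen
    simp only [solutionLoop]
    have hprev : PySem.List.pyGetD iterates (-1) [] = arr.map (pvF^[j]) := by
      rw [PySem.List.pyGetD_neg_one (h := hne)]
      rw [List.getLast?_eq_some_getLast hne] at hlast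
      have h4 := Option.some_injective _ hlast
      rw [List.getLast_eq_getElem] at h4
      rw [List.getLast_eq_getElem]
      exact h4
    have hlenp : (arr.map (pvF^[j])).length = arr.length := by simp
    have htmp : solutionTmp (PySem.List.pyGetD iterates (-1) []) arr.length
        = arr.map (pvF^[j + 1]) := by
      rw [hprev, ← hlenp, solutionTmp_eq, pv_map_iterate_succ]
    have hlast1 : PySem.List.pyGetD
        (iterates ++ [solutionTmp (PySem.List.pyGetD iterates (-1) []) arr.length]) (-1) []
        = arr.map (pvF^[j + 1]) := by
      rw [PySem.List.pyGetD_neg_one_append_singleton, htmp]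
    have hits_len : (iterates ++ [solutionTmp (PySem.List.pyGetD iterates (-1) []) arr.length]).length
        = j + 2 := by simp [hlen]
    have hlast2 : PySem.List.pyGetD
        (iterates ++ [solutionTmp (PySem.List.pyGetD iterates (-1) []) arr.length]) (-2) []
        = arr.map (pvF^[j]) := by
      rw [PySem.List.pyGetD_neg_ofNat _ 2 [] (by omega) (by omega)]
      have hjlt : j < iterates.length := by omega
      simp only [hits_len, Nat.add_sub_cancel]
      rw [List.getElem_append_left hjlt]
      rw [List.getLast?_eq_some_getLast hne] at hlast
      have h4 := Option.some_injective _ hlast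
      rw [List.getLast_eq_getElem] at h4
      simpa [hlen] using h4
    rw [hlast1, hlast2]
    by_cases hstop : arr.map (pvF^[j + 1]) = arr.map (pvF^[j])
    · rw [if_pos hstop, hits_len]
      have hall : ∀ x ∈ arr, pvCnt x ≤ j := by
        intro x hx
        rw [pvCnt_le_iff (hg x hx)]
        exact List.map_eq_map_iff.mp hstop x hx
      have hMle : pvM arr ≤ j := by
        unfold pvM; rw [pv_foldl_max_le_iff]; exact ⟨Nat.zero_le _, hall⟩
      have : j = pvM arr := by omega
      subst this; push_cast; ring
    · rw [if_neg hstop]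
      have hlt : ¬ pvM arr ≤ j := by
        unfold pvM; rw [pv_foldl_max_le_iff]
        rintro ⟨-, hall⟩
        apply hstop
        rw [List.map_eq_map_iff]
        intro x hx
        exact (pvCnt_le_iff (hg x hx) j).mp (hall x hx)
      exact ih (j + 1) _ arr hg hits_len (by rw [List.getLast?_concat]; rw [htmp]) (by omega) (by omega)

-- bound on the maximum count: fits A's fuel
lemma pv_natAbs_le_sum {x : Int} {arr : List Int} (hx : x ∈ arr) :
    x.natAbs ≤ (arr.map (fun x => x.natAbs)).sum := by
  induction arr with
  | nil => cases hx
  | cons y t ih =>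
    rcases List.mem_cons.mp hx with rfl | hx
    · simp
    · simp only [List.map_cons, List.sum_cons]
      exact le_add_of_nonneg_of_le (Nat.zero_le _) (ih hx)

lemma pvM_lt_fuel {arr : List Int} (hg : ∀ x ∈ arr, pvGood x) :
    pvM arr < (arr.map (fun x => x.natAbs)).sum + 101 := by
  have : pvM arr ≤ (arr.map (fun x => x.natAbs)).sum + 100 := by
    unfold pvM; rw [pv_foldl_max_le_iff]
    refine ⟨Nat.zero_le _, fun x hx => ?_⟩
    have h1 := pvCnt_le_mu (pvMu x) x le_rfl (hg x hx)
    have h2 := pvMu_le x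
    have h3 := pv_natAbs_le_sum hx
    omega
  omega

-- B's inner while-loop computes the per-element count
lemma pvStepsAux_eq : ∀ (fuel : Nat) (x c : Int), pvGood x → pvMu x < fuel →
    pvStepsAux x c fuel = c + (pvCnt x : Int) := by
  intro fuel
  induction fuel with
  | zero => intro x c _ h; omega
  | succ n ih =>
    intro x c hg hf
    simp only [pvStepsAux, pvTransform_eq]
    by_cases h : pvF x = x
    · simp [h, pvCnt_fix h]
    · have hd := pvMu_decr hg h
      rw [if_neg h, ih (pvF x) (c + 1) (pvGood_step hg) (by omega), pvCnt_succ hg h]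
      push_cast; ring

lemma solution_alt_eq {arr : List Int} (hg : ∀ x ∈ arr, pvGood x) :
    solution_alt arr = (pvM arr : Int) := by
  unfold solution_alt pvM
  suffices h : ∀ (l : List Int) (a : Nat), (∀ x ∈ l, pvGood x) →
      l.foldl (fun best x => max best (pvStepsAux x 0 (x.natAbs + 101))) (a : Int)
      = ((l.foldl (fun m x => max m (pvCnt x)) a : Nat) : Int) by
    exact_mod_cast h arr 0 hg
  intro l
  induction l with
  | nil => simp
  | cons y t ih =>
    intro a hgl
    simp only [List.foldl_cons]
    rw [pvStepsAux_eq _ _ _ (hgl y (List.mem_cons_self)) (by have := pvMu_le y; omega)]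
    rw [show (0 : Int) + (pvCnt y : Int) = ((pvCnt y : Nat) : Int) by ring]
    rw [← Nat.cast_max, ih (max a (pvCnt y)) (fun x hx => hgl x (List.mem_cons_of_mem _ hx))]

-- ===== VERDICT (by name: the statement is the Claim_ definition above) =====
theorem solution_spec : Claim_equal_solution := by
  intro arr _ hpre
  unfold Spec_solution solution
  have hg : ∀ x ∈ arr, pvGood x := fun x hx => hpre x hx
  rw [solution_alt_eq hg]
  exact solutionLoop_eq _ 0 [arr] arr hg rfl (by simp) (Nat.zero_le _) (by simpa using pvM_lt_fuel hg)
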